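-- pv_equiv track=rewrite | github.com/pypi-data/pypi-mirror-401 | packages/pytecplot/pytecplot-1.7.3-py3-none-any.whl/tecplot/tecutil/util.py | array_to_str
-- ===== SOURCE A (Python) =====
-- def array_to_str(arr, maxlen=10):
--     try:
--         itr = iter(arr)
--         item = next(itr)
--         ret = '[' + str(item)
--         for i, item in enumerate(itr, start=2):
--             if i > maxlen:
--                 ret += ' ...'
--                 break
--             ret += ', {}'.format(item)
--         return ret + ']'
--     except StopIteration:
--         return '[]'
--     except TypeError:
--         return str(arr)
-- ===== SOURCE B (Python) =====
-- def array_to_str(arr, maxlen=10):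
--     try:
--         items = list(arr)
--     except TypeError:
--         return str(arr)
--     if not items:
--         return '[]'
--     n = max(1, maxlen)
--     body = ', '.join(str(x) for x in items[:n])
--     tail = ' ...' if len(items) > n else ''
--     return '[' + body + tail + ']'
-- ===== Notes on version B (the rewrite author's own statement) =====
-- stated objective: simpler
-- what changed: Replaced the incremental next()/enumerate concatenation loop carrying a growing string with a slice-then-join decomposition: take the first max(1, maxlen) items, join them with ', ', and append ' ...' from a single length comparison.
import Mathlib
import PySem

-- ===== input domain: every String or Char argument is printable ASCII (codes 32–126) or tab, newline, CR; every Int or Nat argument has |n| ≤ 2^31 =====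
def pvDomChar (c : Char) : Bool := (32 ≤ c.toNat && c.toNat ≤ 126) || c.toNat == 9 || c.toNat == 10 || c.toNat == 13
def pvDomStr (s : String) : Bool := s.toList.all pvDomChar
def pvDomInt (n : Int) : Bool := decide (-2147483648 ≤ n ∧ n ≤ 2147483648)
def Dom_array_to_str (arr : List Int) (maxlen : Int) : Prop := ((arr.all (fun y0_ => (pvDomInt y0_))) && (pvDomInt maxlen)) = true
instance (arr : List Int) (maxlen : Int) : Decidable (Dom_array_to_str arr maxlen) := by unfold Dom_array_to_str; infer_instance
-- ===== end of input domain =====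

-- B replaces A's incremental next()/enumerate string-concatenation loop by a slice-then-join decomposition (simpler).


-- ===== PORT A =====
-- the 'for i, item in enumerate(itr, start=2)' loop with its growing accumulator 'ret' and the break
def pvALoop (maxlen : Int) : Int → List Int → String → String
  | _, [], ret => ret
  | i, x :: xs, ret =>
    if i > maxlen then ret ++ " ..."
    else pvALoop maxlen (i + 1) xs (ret ++ ", " ++ PySem.Int.toStr x)

def array_to_str (arr : List Int) (maxlen : Int) : String :=
  match arr with
  | [] => "[]"                                   -- next(itr) raises StopIteration
  | x :: rest => pvALoop maxlen 2 rest ("[" ++ PySem.Int.toStr x) ++ "]"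

-- ===== PORT B =====
def array_to_str_alt (arr : List Int) (maxlen : Int) : String :=
  match arr with
  | [] => "[]"
  | _ :: _ =>
    let n : Int := max 1 maxlen
    let body := PySem.Str.join ", " ((PySem.List.slice arr none (some n)).map PySem.Int.toStr)
    let tail := if (arr.length : Int) > n then " ..." else ""
    "[" ++ body ++ tail ++ "]"

-- ===== PRECONDITION & SPEC =====
def Spec_array_to_str (arr : List Int) (maxlen : Int) (out : String) : Prop := out = array_to_str_alt arr maxlen
instance (arr : List Int) (maxlen : Int) (out : String) : Decidable (Spec_array_to_str arr maxlen out) := by unfold Spec_array_to_str; infer_instance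

-- ===== CLAIM (what is proved, stated in full; the proofs are below) =====
def Claim_equal_array_to_str : Prop := ∀ (arr : List Int) (maxlen : Int), Dom_array_to_str arr maxlen → Spec_array_to_str arr maxlen (array_to_str arr maxlen)

-- ===== LEMMAS AND PROOFS =====

-- characters produced by A's loop after the accumulator, without the accumulator
def pvTail (m : Int) : Int → List Int → List Char
  | _, [] => []
  | i, x :: xs =>
    if i > m then " ...".toList
    else ", ".toList ++ PySem.Int.toChars x ++ pvTail m (i + 1) xs

-- ', '-separated rendering of a list's items, each preceded by the separator
def pvSep : List Int → List Char
  | [] => []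
  | x :: xs => ", ".toList ++ PySem.Int.toChars x ++ pvSep xs

theorem pvALoop_toList (m : Int) : ∀ (xs : List Int) (i : Int) (ret : String),
    (pvALoop m i xs ret).toList = ret.toList ++ pvTail m i xs := by
  intro xs
  induction xs with
  | nil => intro i ret; simp [pvALoop, pvTail]
  | cons x xs ih =>
    intro i ret
    by_cases h : i > m
    · simp [pvALoop, pvTail, h, String.toList_append]
    · simp [pvALoop, pvTail, h, ih, String.toList_append, PySem.Int.toList_toStr]

theorem pvTail_eq (m : Int) : ∀ (xs : List Int) (i : Int),
    pvTail m i xs = pvSep (xs.take (m - i + 1).toNat) ++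
      (if (m - i + 1).toNat < xs.length then " ...".toList else []) := by
  intro xs
  induction xs with
  | nil => intro i; simp [pvTail, pvSep]
  | cons x xs ih =>
    intro i
    by_cases h : i > m
    · have hk : (m - i + 1).toNat = 0 := by omega
      simp [pvTail, h, hk, pvSep]
    · obtain ⟨j, hj⟩ : ∃ j, (m - i + 1).toNat = j + 1 := ⟨(m - i).toNat, by omega⟩
      have hj2 : (m - (i + 1) + 1).toNat = j := by omega
      simp only [pvTail, if_neg h, ih (i + 1), hj2, hj, List.take_succ_cons, pvSep,
        List.length_cons, List.append_assoc]
      congr 2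
      simp

theorem pvJoin_toList : ∀ (l : List Int) (x : Int),
    (PySem.Str.join ", " ((x :: l).map PySem.Int.toStr)).toList =
      PySem.Int.toChars x ++ pvSep l := by
  intro l
  induction l with
  | nil =>
    intro x
    simp [PySem.Str.toList_join, PySem.Chars.join_singleton, PySem.Int.toList_toStr, pvSep]
  | cons y l ih =>
    intro x
    have h := ih y
    simp only [PySem.Str.toList_join, List.map_cons] at h ⊢
    rw [PySem.Chars.join_cons_cons, h, pvSep, PySem.Int.toList_toStr]
    simp

-- ===== VERDICT (by name: the statement is the Claim_ definition above) =====
theorem array_to_str_spec : Claim_equal_array_to_str := by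
  intro arr maxlen _
  unfold Spec_array_to_str
  rw [← String.toList_inj]
  cases arr with
  | nil => rfl
  | cons x rest =>
    have hn0 : (0 : Int) ≤ max 1 maxlen := by omega
    have hn : (max 1 maxlen).toNat = (maxlen - 1).toNat + 1 := by omega
    have h2 : maxlen - 2 + 1 = maxlen - 1 := by ring
    simp only [array_to_str, array_to_str_alt, String.toList_append,
      pvALoop_toList, pvTail_eq, h2, PySem.List.slice_to _ hn0, hn,
      List.take_succ_cons, pvJoin_toList, PySem.Int.toList_toStr]
    have hiff : ((maxlen - 1).toNat < rest.length) ↔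
        (((x :: rest).length : Int) > max 1 maxlen) := by
      simp only [List.length_cons]
      push_cast
      omega
    by_cases hc : (maxlen - 1).toNat < rest.length
    · rw [if_pos hc, if_pos (hiff.mp hc)]
      simp
    · rw [if_neg hc, if_neg (fun h => hc (hiff.mpr h))]
      simp
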